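-- pv_equiv track=rewrite | github.com/gazizti19-bot/ozon-auto-supply-bot | supply_integration.py | _split_header_and_items
-- ===== SOURCE A (Python) =====
-- from typing import Tuple, Optional, List, Dict, Any
--
-- def _split_header_and_items(payload: str) -> Tuple[str, List[str]]:
--     lines = [ln for ln in (payload or "").splitlines()]
--     while lines and not lines[0].strip():
--         lines.pop(0)
--     if not lines:
--         return "", []
--     header = lines[0].strip()
--     items = [ln for ln in lines[1:] if ln.strip()]
--     return header, items
-- ===== SOURCE B (Python) =====
-- from typing import Tuple, List
--
-- def _split_header_and_items(payload: str) -> Tuple[str, List[str]]: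
--     nonblank = [ln for ln in (payload or "").splitlines() if ln.strip()]
--     if not nonblank:
--         return "", []
--     return nonblank[0].strip(), nonblank[1:]
-- ===== Notes on version B (the rewrite author's own statement) =====
-- stated objective: simpler
-- what changed: A's two-phase structure (a while-loop popping leading blank lines, then a separate filter over the remainder) is replaced by a single filtering pass over all lines followed by a head/tail split.
import Mathlib
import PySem

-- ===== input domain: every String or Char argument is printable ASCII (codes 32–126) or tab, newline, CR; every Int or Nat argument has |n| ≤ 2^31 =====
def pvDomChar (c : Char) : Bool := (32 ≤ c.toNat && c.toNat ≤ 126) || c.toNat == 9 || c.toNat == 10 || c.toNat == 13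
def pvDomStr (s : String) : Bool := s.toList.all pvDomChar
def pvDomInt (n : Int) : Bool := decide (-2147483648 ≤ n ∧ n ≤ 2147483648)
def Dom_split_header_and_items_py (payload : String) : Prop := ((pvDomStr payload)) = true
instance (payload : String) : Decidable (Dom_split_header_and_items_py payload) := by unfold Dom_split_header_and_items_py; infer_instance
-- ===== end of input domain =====

-- B replaces A's two-phase skip-leading-blanks loop + filter with one filtering pass over all lines plus a head/tail split (objective: simpler).


-- ===== PORT A =====
-- the 'while lines and not lines[0].strip(): lines.pop(0)' loop
def pvPopBlanks : List String → List String
  | [] => []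
  | l :: ls => if PySem.Str.strip l == "" then pvPopBlanks ls else l :: ls

def split_header_and_items_py (payload : String) : String × List String :=
  let lines := PySem.Str.splitlines payload
  let lines := pvPopBlanks lines
  match lines with
  | [] => ("", [])
  | h :: rest => (PySem.Str.strip h, rest.filter (fun ln => !(PySem.Str.strip ln == "")))

-- ===== PORT B =====
def split_header_and_items_py_alt (payload : String) : String × List String :=
  let nonblank := (PySem.Str.splitlines payload).filter (fun ln => !(PySem.Str.strip ln == ""))
  match nonblank with
  | [] => ("", [])
  | h :: rest => (PySem.Str.strip h, rest)

-- ===== PRECONDITION & SPEC =====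
def Spec_split_header_and_items_py (payload : String) (out : String × List String) : Prop := out = split_header_and_items_py_alt payload
instance (payload : String) (out : String × List String) : Decidable (Spec_split_header_and_items_py payload out) := by unfold Spec_split_header_and_items_py; infer_instance

-- ===== CLAIM (what is proved, stated in full; the proofs are below) =====
def Claim_equal_split_header_and_items_py : Prop := ∀ (payload : String), Dom_split_header_and_items_py payload → Spec_split_header_and_items_py payload (split_header_and_items_py payload)

-- ===== LEMMAS AND PROOFS =====
lemma pv_core_eq (l : List String) :
    (match pvPopBlanks l with
      | [] => (("" : String), ([] : List String))
      | h :: rest => (PySem.Str.strip h, rest.filter (fun ln => !(PySem.Str.strip ln == ""))))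
    =
    (match l.filter (fun ln => !(PySem.Str.strip ln == "")) with
      | [] => (("" : String), ([] : List String))
      | h :: rest => (PySem.Str.strip h, rest)) := by
  induction l with
  | nil => rfl
  | cons h t ih =>
    by_cases hb : PySem.Str.strip h == ""
    · simp [pvPopBlanks, hb] at ih ⊢
      exact ih
    · simp [pvPopBlanks, hb]

-- ===== VERDICT (by name: the statement is the Claim_ definition above) =====
theorem split_header_and_items_py_spec : Claim_equal_split_header_and_items_py := by
  intro payload _
  unfold Spec_split_header_and_items_py split_header_and_items_py split_header_and_items_py_alt
  simpa using pv_core_eq (PySem.Str.splitlines payload)
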